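-- pv_equiv track=rewrite | github.com/wcrainshaw-eng/permitgrab | city_onboarding.py | _auto_detect_fields
-- ===== SOURCE A (Python) =====
-- def _auto_detect_fields(col_names, col_types):
--     """Auto-detect Socrata field mappings."""
--     field_map = {}
--
--     date_patterns = [
--         'issued_date', 'issue_date', 'permit_issued_date', 'issueddate',
--         'date_issued', 'approval_date', 'applied_date', 'application_date',
--         'permit_date', 'filed_date', 'created_date', 'status_date',
--         'permitissuedate', 'issuedate', 'finaldate',
--     ]
--     for col in col_names:
--         if any(p in col.lower() for p in date_patterns):
--             field_map['date_field'] = col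
--             break
--     if not field_map.get('date_field'):
--         for col in col_names:
--             if col_types.get(col) in ('calendar_date', 'floating_timestamp'):
--                 field_map['date_field'] = col
--                 break
--
--     for patterns, key in [
--         (['permit_number', 'permit_no', 'permitnumber', 'permit_num',
--           'record_id', 'application_number', 'case_number', 'permit_id'], 'permit_number_field'),
--         (['address', 'site_address', 'location', 'street_address',
--           'project_address', 'work_location', 'property_address'], 'address_field'),
--         (['description', 'work_description', 'permit_type', 'work_type',
--           'project_description', 'permit_description'], 'description_field'),
--         (['city', 'municipality', 'jurisdiction', 'town'], 'city_field'),
--         (['estimated_cost', 'job_value', 'construction_cost', 'valuation',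
--           'total_cost', 'project_value', 'cost'], 'value_field'),
--         (['contractor', 'contractor_name', 'applicant', 'builder'], 'contractor_field'),
--     ]:
--         for col in col_names:
--             if any(p in col.lower() for p in patterns):
--                 field_map[key] = col
--                 break
--
--     return field_map
-- ===== SOURCE B (Python) =====
-- # Single pass over col_names filling every category at once (columns lowercased
-- # once), instead of one scan of col_names per category.
--
-- _DATE_PATTERNS = [
--     'issued_date', 'issue_date', 'permit_issued_date', 'issueddate',
--     'date_issued', 'approval_date', 'applied_date', 'application_date',
--     'permit_date', 'filed_date', 'created_date', 'status_date',
--     'permitissuedate', 'issuedate', 'finaldate',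
-- ]
-- _PERMIT_PATTERNS = ['permit_number', 'permit_no', 'permitnumber', 'permit_num',
--                     'record_id', 'application_number', 'case_number', 'permit_id']
-- _ADDRESS_PATTERNS = ['address', 'site_address', 'location', 'street_address',
--                      'project_address', 'work_location', 'property_address']
-- _DESC_PATTERNS = ['description', 'work_description', 'permit_type', 'work_type',
--                   'project_description', 'permit_description']
-- _CITY_PATTERNS = ['city', 'municipality', 'jurisdiction', 'town']
-- _VALUE_PATTERNS = ['estimated_cost', 'job_value', 'construction_cost', 'valuation',
--                    'total_cost', 'project_value', 'cost']
-- _CONTRACTOR_PATTERNS = ['contractor', 'contractor_name', 'applicant', 'builder']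
--
--
-- def _auto_detect_fields(col_names, col_types):
--     """Auto-detect Socrata field mappings (single pass over the columns)."""
--     date = permit = address = desc = city = value = contractor = None
--     for col in col_names:
--         low = col.lower()
--         if date is None and any(p in low for p in _DATE_PATTERNS):
--             date = col
--         if permit is None and any(p in low for p in _PERMIT_PATTERNS):
--             permit = col
--         if address is None and any(p in low for p in _ADDRESS_PATTERNS):
--             address = col
--         if desc is None and any(p in low for p in _DESC_PATTERNS):
--             desc = col
--         if city is None and any(p in low for p in _CITY_PATTERNS):
--             city = col
--         if value is None and any(p in low for p in _VALUE_PATTERNS):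
--             value = col
--         if contractor is None and any(p in low for p in _CONTRACTOR_PATTERNS):
--             contractor = col
--     if date is None:
--         for col in col_names:
--             if col_types.get(col) in ('calendar_date', 'floating_timestamp'):
--                 date = col
--                 break
--     field_map = {}
--     for key, val in (('date_field', date), ('permit_number_field', permit),
--                      ('address_field', address), ('description_field', desc),
--                      ('city_field', city), ('value_field', value),
--                      ('contractor_field', contractor)):
--         if val is not None:
--             field_map[key] = val
--     return field_map
-- ===== Notes on version B (the rewrite author's own statement) =====
-- stated objective: alternative
-- what changed: One single pass over col_names fills all seven categories at once (each name lowercased once, first hit per category kept), with the type-based date fallback only if no date pattern matched, instead of one full scan of col_names per category; the result dict is assembled in the fixed key order afterwards.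
import Mathlib
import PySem

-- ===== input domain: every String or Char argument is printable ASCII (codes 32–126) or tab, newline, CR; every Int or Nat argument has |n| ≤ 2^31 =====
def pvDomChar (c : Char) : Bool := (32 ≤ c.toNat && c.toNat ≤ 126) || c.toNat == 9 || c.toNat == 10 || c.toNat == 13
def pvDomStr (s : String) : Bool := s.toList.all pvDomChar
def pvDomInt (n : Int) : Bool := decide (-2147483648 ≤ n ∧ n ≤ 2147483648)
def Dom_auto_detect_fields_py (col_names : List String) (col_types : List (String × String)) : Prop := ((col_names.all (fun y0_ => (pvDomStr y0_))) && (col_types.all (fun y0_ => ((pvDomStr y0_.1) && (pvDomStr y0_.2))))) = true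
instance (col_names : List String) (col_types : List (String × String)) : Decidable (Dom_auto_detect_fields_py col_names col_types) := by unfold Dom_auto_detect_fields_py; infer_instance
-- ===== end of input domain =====

-- B replaces A's seven scans of col_names (one per category) by a single pass that
-- fills all categories at once and assembles the result dict afterwards (alternative decomposition).


-- shared pattern data (literal lists from the source)
def pvDatePats : List String := ["issued_date", "issue_date", "permit_issued_date", "issueddate",
  "date_issued", "approval_date", "applied_date", "application_date",
  "permit_date", "filed_date", "created_date", "status_date",
  "permitissuedate", "issuedate", "finaldate"]
def pvPermitPats : List String := ["permit_number", "permit_no", "permitnumber", "permit_num",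
  "record_id", "application_number", "case_number", "permit_id"]
def pvAddressPats : List String := ["address", "site_address", "location", "street_address",
  "project_address", "work_location", "property_address"]
def pvDescPats : List String := ["description", "work_description", "permit_type", "work_type",
  "project_description", "permit_description"]
def pvCityPats : List String := ["city", "municipality", "jurisdiction", "town"]
def pvValuePats : List String := ["estimated_cost", "job_value", "construction_cost", "valuation",
  "total_cost", "project_value", "cost"]
def pvContractorPats : List String := ["contractor", "contractor_name", "applicant", "builder"]

-- any(p in col.lower() for p in patterns)
def pvLowerHas (pats : List String) (col : String) : Bool :=
  pats.any (fun p => PySem.Str.isIn p (PySem.Str.lower col))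

-- col_types.get(col) in ('calendar_date', 'floating_timestamp')
def pvFBCond (types : PySem.Dict String String) (c : String) : Bool :=
  types.get? c == some "calendar_date" || types.get? c == some "floating_timestamp"

-- ===== PORT A =====
-- 'for col in col_names: if any(p in col.lower() ...): field_map[key] = col; break'
def pvA_cat (pats : List String) (key : String) (cols : List String)
    (fm : PySem.Dict String String) : PySem.Dict String String :=
  match cols with
  | [] => fm
  | c :: rest => if pvLowerHas pats c then fm.insert key c else pvA_cat pats key rest fm

-- the type-based fallback loop with break
def pvA_fb (types : PySem.Dict String String) (cols : List String)
    (fm : PySem.Dict String String) : PySem.Dict String String :=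
  match cols with
  | [] => fm
  | c :: rest => if pvFBCond types c then fm.insert "date_field" c else pvA_fb types rest fm

def auto_detect_fields_py (col_names : List String) (col_types : List (String × String)) : List (String × String) :=
  let types := PySem.Dict.mk col_types
  let fm0 := pvA_cat pvDatePats "date_field" col_names PySem.Dict.empty
  -- 'if not field_map.get("date_field")': None or '' is falsy
  let fm1 := if (fm0.getD "date_field" "") == "" then pvA_fb types col_names fm0 else fm0
  let fm2 := [(pvPermitPats, "permit_number_field"), (pvAddressPats, "address_field"),
              (pvDescPats, "description_field"), (pvCityPats, "city_field"),
              (pvValuePats, "value_field"), (pvContractorPats, "contractor_field")].foldl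
    (fun fm pk => pvA_cat pk.1 pk.2 col_names fm) fm1
  fm2.items

-- ===== PORT B =====
-- one slot update: 'if slot is None and any(p in low for p in pats): slot = col'
def pvB_upd (o : Option String) (pats : List String) (low : String) (col : String) : Option String :=
  match o with
  | some x => some x
  | none => if pats.any (fun p => PySem.Str.isIn p low) then some col else none

-- the single pass over col_names updating all seven slots
def pvB_scan (cols : List String)
    (st : Option String × Option String × Option String × Option String × Option String × Option String × Option String) :
    Option String × Option String × Option String × Option String × Option String × Option String × Option String :=
  match cols with
  | [] => st
  | c :: rest =>
    match st with
    | (d, p, a, ds, ci, v, co) =>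
      let low := PySem.Str.lower c
      pvB_scan rest (pvB_upd d pvDatePats low c, pvB_upd p pvPermitPats low c,
        pvB_upd a pvAddressPats low c, pvB_upd ds pvDescPats low c,
        pvB_upd ci pvCityPats low c, pvB_upd v pvValuePats low c,
        pvB_upd co pvContractorPats low c)

-- the date type-fallback loop with break
def pvB_fb (types : PySem.Dict String String) : List String → Option String
  | [] => none
  | c :: rest => if pvFBCond types c then some c else pvB_fb types rest

-- 'for key, val in (...): if val is not None: field_map[key] = val'
def pvB_out (pairs : List (String × Option String)) : PySem.Dict String String :=
  pairs.foldl (fun fm kv => match kv.2 with | none => fm | some v => fm.insert kv.1 v)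
    PySem.Dict.empty

def auto_detect_fields_py_alt (col_names : List String) (col_types : List (String × String)) : List (String × String) :=
  let types := PySem.Dict.mk col_types
  match pvB_scan col_names (none, none, none, none, none, none, none) with
  | (d, p, a, ds, ci, v, co) =>
    let d := match d with | some x => some x | none => pvB_fb types col_names
    (pvB_out [("date_field", d), ("permit_number_field", p), ("address_field", a),
              ("description_field", ds), ("city_field", ci), ("value_field", v),
              ("contractor_field", co)]).items

-- ===== PRECONDITION & SPEC =====
def Spec_auto_detect_fields_py (col_names : List String) (col_types : List (String × String)) (out : List (String × String)) : Prop := out = auto_detect_fields_py_alt col_names col_types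
instance (col_names : List String) (col_types : List (String × String)) (out : List (String × String)) : Decidable (Spec_auto_detect_fields_py col_names col_types out) := by unfold Spec_auto_detect_fields_py; infer_instance

-- ===== CLAIM (what is proved, stated in full; the proofs are below) =====
def Claim_equal_auto_detect_fields_py : Prop := ∀ (col_names : List String) (col_types : List (String × String)), Dom_auto_detect_fields_py col_names col_types → Spec_auto_detect_fields_py col_names col_types (auto_detect_fields_py col_names col_types)

-- ===== LEMMAS AND PROOFS =====

-- the first column whose lowercased name contains one of the patterns
def pvFirst (pats : List String) (cols : List String) : Option String :=
  List.find? (fun c => pvLowerHas pats c) cols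

theorem pvA_cat_eq (pats : List String) (key : String) (cols : List String)
    (fm : PySem.Dict String String) :
    pvA_cat pats key cols fm =
      match pvFirst pats cols with
      | none => fm
      | some c => fm.insert key c := by
  induction cols with
  | nil => rfl
  | cons c rest ih =>
    by_cases h : pvLowerHas pats c
    · simp [pvA_cat, pvFirst, h]
    · simp [pvA_cat, pvFirst, h] at ih ⊢
      exact ih

theorem pvA_fb_eq (types : PySem.Dict String String) (cols : List String)
    (fm : PySem.Dict String String) :
    pvA_fb types cols fm =
      match pvB_fb types cols with
      | none => fm
      | some c => fm.insert "date_field" c := by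
  induction cols with
  | nil => rfl
  | cons c rest ih =>
    by_cases h : pvFBCond types c
    · simp [pvA_fb, pvB_fb, h]
    · simp [pvA_fb, pvB_fb, h]
      exact ih

theorem pvB_upd_eq (o : Option String) (pats : List String) (c : String) :
    pvB_upd o pats (PySem.Str.lower c) c =
      o.or (if pvLowerHas pats c then some c else none) := by
  cases o <;> rfl

theorem pvB_scan_eq (cols : List String)
    (o1 o2 o3 o4 o5 o6 o7 : Option String) :
    pvB_scan cols (o1, o2, o3, o4, o5, o6, o7) =
      (o1.or (pvFirst pvDatePats cols), o2.or (pvFirst pvPermitPats cols),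
       o3.or (pvFirst pvAddressPats cols), o4.or (pvFirst pvDescPats cols),
       o5.or (pvFirst pvCityPats cols), o6.or (pvFirst pvValuePats cols),
       o7.or (pvFirst pvContractorPats cols)) := by
  induction cols generalizing o1 o2 o3 o4 o5 o6 o7 with
  | nil => simp [pvB_scan, pvFirst]
  | cons c rest ih =>
    simp only [pvB_scan, pvB_upd_eq, ih]
    simp only [pvFirst, List.find?_cons]
    cases h1 : pvLowerHas pvDatePats c <;>
      cases h2 : pvLowerHas pvPermitPats c <;>
      cases h3 : pvLowerHas pvAddressPats c <;>
      cases h4 : pvLowerHas pvDescPats c <;>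
      cases h5 : pvLowerHas pvCityPats c <;>
      cases h6 : pvLowerHas pvValuePats c <;>
      cases h7 : pvLowerHas pvContractorPats c <;>
      simp

theorem pvFirst_date_ne_empty (cols : List String) (c : String)
    (h : pvFirst pvDatePats cols = some c) : c ≠ "" := by
  intro hc
  subst hc
  have := List.find?_some h
  rw [show pvLowerHas pvDatePats "" = false from by decide] at this
  exact Bool.false_ne_true this

theorem auto_detect_fields_eq (col_names : List String) (col_types : List (String × String)) :
    auto_detect_fields_py col_names col_types = auto_detect_fields_py_alt col_names col_types := by
  unfold auto_detect_fields_py auto_detect_fields_py_alt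
  rw [pvB_scan_eq]
  simp only [Option.none_or, List.foldl, pvA_cat_eq, pvA_fb_eq, pvB_out]
  cases h : pvFirst pvDatePats col_names with
  | none =>
    simp [PySem.Dict.getD_empty]
  | some c =>
    have hne : c ≠ "" := pvFirst_date_ne_empty col_names c h
    simp [PySem.Dict.getD_insert_self, hne]

-- ===== VERDICT (by name: the statement is the Claim_ definition above) =====
theorem auto_detect_fields_py_spec : Claim_equal_auto_detect_fields_py := by
  intro col_names col_types _
  unfold Spec_auto_detect_fields_py
  exact auto_detect_fields_eq col_names col_types
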